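-- pv_equiv track=rewrite | github.com/mariosinnadamas/DAM-Python | Tema4/EjerTuplas/Ej1.py | analizar_numeros
-- ===== SOURCE A (Python) =====
-- def analizar_numeros(numeros):
--     pares = 0
--     impares = 0
--     suma_total = 0
--
--     for n in numeros:
--         suma_total += n
--         if n % 2 == 0:
--             pares += 1
--         else:
--             impares += 1
--
--     return pares, impares, suma_total
-- ===== SOURCE B (Python) =====
-- def analizar_numeros(numeros):
--     lst = list(numeros)
--
--     def conquer(lo, hi):
--         # divide and conquer over the half-open range [lo, hi)
--         if hi - lo == 0:
--             return (0, 0, 0)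
--         if hi - lo == 1:
--             n = lst[lo]
--             return (1, 0, n) if n % 2 == 0 else (0, 1, n)
--         mid = (lo + hi) // 2
--         p1, i1, s1 = conquer(lo, mid)
--         p2, i2, s2 = conquer(mid, hi)
--         return (p1 + p2, i1 + i2, s1 + s2)
--
--     return conquer(0, len(lst))
-- ===== Notes on version B (the rewrite author's own statement) =====
-- stated objective: alternative
-- what changed: Replaces A's single left-to-right loop with three mutable accumulators by a divide-and-conquer recursion that splits the list in halves and combines the (evens, odds, sum) triples of the halves; correct because each component is an associative-commutative aggregation.
import Mathlib
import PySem

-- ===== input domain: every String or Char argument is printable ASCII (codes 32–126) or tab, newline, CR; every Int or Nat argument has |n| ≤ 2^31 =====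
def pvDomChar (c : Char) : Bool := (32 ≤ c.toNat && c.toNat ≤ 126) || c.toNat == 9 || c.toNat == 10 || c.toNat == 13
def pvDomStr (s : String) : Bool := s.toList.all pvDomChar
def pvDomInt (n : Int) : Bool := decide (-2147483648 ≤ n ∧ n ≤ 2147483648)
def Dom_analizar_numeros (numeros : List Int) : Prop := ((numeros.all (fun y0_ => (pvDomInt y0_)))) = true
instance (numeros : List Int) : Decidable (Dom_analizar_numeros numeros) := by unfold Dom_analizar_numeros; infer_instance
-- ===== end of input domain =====

-- ===== PORT A =====
-- B replaces A's single left-to-right three-accumulator loop with a divide-and-conquer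
-- recursion combining (evens, odds, sum) triples of the two halves; objective: alternative.
def analizar_numeros (numeros : List Int) : Int × Int × Int :=
  numeros.foldl (fun (st : Int × Int × Int) n =>
    let (pares, impares, suma_total) := st
    let suma_total := suma_total + n
    if PySem.Int.mod n 2 = 0 then (pares + 1, impares, suma_total)
    else (pares, impares + 1, suma_total)) (0, 0, 0)

-- ===== PORT B =====
-- conquer(lo, hi) in Source B works on lst[lo:hi]; here that sublist is the argument,
-- and the mid split becomes take/drop at length / 2.
def analizarConquer (l : List Int) : Int × Int × Int :=
  match l with
  | [] => (0, 0, 0)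
  | [n] => if PySem.Int.mod n 2 = 0 then (1, 0, n) else (0, 1, n)
  | a :: b :: rest =>
    let m := (a :: b :: rest).length / 2
    let r1 := analizarConquer ((a :: b :: rest).take m)
    let r2 := analizarConquer ((a :: b :: rest).drop m)
    (r1.1 + r2.1, r1.2.1 + r2.2.1, r1.2.2 + r2.2.2)
termination_by l.length
decreasing_by
  · simp [List.length_take]; omega
  · simp [List.length_drop]; omega

def analizar_numeros_alt (numeros : List Int) : Int × Int × Int :=
  analizarConquer numeros

-- ===== PRECONDITION & SPEC =====
def Spec_analizar_numeros (numeros : List Int) (out : Int × Int × Int) : Prop := out = analizar_numeros_alt numeros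
instance (numeros : List Int) (out : Int × Int × Int) : Decidable (Spec_analizar_numeros numeros out) := by unfold Spec_analizar_numeros; infer_instance

-- ===== CLAIM (what is proved, stated in full; the proofs are below) =====
def Claim_equal_analizar_numeros : Prop := ∀ (numeros : List Int), Dom_analizar_numeros numeros → Spec_analizar_numeros numeros (analizar_numeros numeros)

-- ===== LEMMAS AND PROOFS =====

-- canonical value both ports compute: (count of evens, count of odds, sum)
def analizarSpec (l : List Int) : Int × Int × Int :=
  ((l.filter (fun n => PySem.Int.mod n 2 = 0)).length,
   (l.filter (fun n => ¬ PySem.Int.mod n 2 = 0)).length,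
   l.sum)

lemma analizarSpec_append (xs ys : List Int) :
    analizarSpec (xs ++ ys) =
      (((analizarSpec xs).1 + (analizarSpec ys).1,
        (analizarSpec xs).2.1 + (analizarSpec ys).2.1,
        (analizarSpec xs).2.2 + (analizarSpec ys).2.2)) := by
  simp [analizarSpec]

lemma conquer_eq_spec (l : List Int) : analizarConquer l = analizarSpec l := by
  induction l using analizarConquer.induct with
  | case1 => rw [analizarConquer]; rfl
  | case2 n h =>
    rw [analizarConquer, if_pos h]
    simp only [analizarSpec, List.filter_cons, List.filter_nil, h, decide_true, decide_not,
      Bool.not_true, if_true]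
    simp
  | case3 n h =>
    rw [analizarConquer, if_neg h]
    simp only [analizarSpec, List.filter_cons, List.filter_nil, h, decide_false, decide_not,
      Bool.not_false, if_true]
    simp
  | case4 a b rest m iht ihd =>
    rw [analizarConquer]
    rw [iht, ihd]
    conv_rhs => rw [← List.take_append_drop ((a :: b :: rest).length / 2) (a :: b :: rest)]
    rw [analizarSpec_append]

lemma analizar_foldl (numeros : List Int) (p i st : Int) :
    numeros.foldl (fun (s : Int × Int × Int) n =>
      let (pares, impares, suma_total) := s
      let suma_total := suma_total + n
      if PySem.Int.mod n 2 = 0 then (pares + 1, impares, suma_total)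
      else (pares, impares + 1, suma_total)) (p, i, st)
    = (p + (analizarSpec numeros).1, i + (analizarSpec numeros).2.1, st + (analizarSpec numeros).2.2) := by
  induction numeros generalizing p i st with
  | nil => simp [analizarSpec]
  | cons h t ih =>
    simp only [List.foldl_cons]
    by_cases hh : PySem.Int.mod h 2 = 0
    · simp only [hh, if_true, ih, analizarSpec, List.filter_cons, decide_not]
      refine Prod.ext ?_ (Prod.ext ?_ ?_) <;> simp [hh] <;> push_cast <;> ring
    · simp only [hh, if_false, ih, analizarSpec, List.filter_cons, decide_not]
      refine Prod.ext ?_ (Prod.ext ?_ ?_) <;> simp [hh] <;> push_cast <;> ring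

-- ===== VERDICT (by name: the statement is the Claim_ definition above) =====
theorem analizar_numeros_spec : Claim_equal_analizar_numeros := by
  intro numeros _
  unfold Spec_analizar_numeros analizar_numeros analizar_numeros_alt
  rw [conquer_eq_spec, analizar_foldl]
  exact Prod.ext (by simp) (Prod.ext (by simp) (by simp))
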